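-- pv_equiv track=rewrite | github.com/mikan-sakura/DCGAT | dataloader_utils.py | find_head_idx
-- ===== SOURCE A (Python) =====
-- from typing import List, Dict, Tuple
--
-- def find_head_idx(source: List[str], target: List[str]) -> int:
--     """Improved entity head index finding with fuzzy matching"""
--     target_len = len(target)
--     if target_len == 0:
--         return -1
--
--     for i in range(len(source)):
--         if source[i:i + target_len] == target:
--             return i
--
--     target_str = ''.join(target).replace('##', '')
--     source_str = ''.join(source).replace('##', '')
--     idx = source_str.find(target_str)
--     if idx != -1:
--         char_count = 0
--         for token_idx, token in enumerate(source):
--             char_count += len(token.replace('##', ''))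
--             if char_count > idx:
--                 return token_idx
--     return -1
-- ===== SOURCE B (Python) =====
-- from typing import List
--
--
-- def find_head_idx(source: List[str], target: List[str]) -> int:
--     """KMP search for the first token-level occurrence of target in source;
--     fuzzy fallback maps a character offset in the '##'-stripped text back to a
--     token index by binary search over the running stripped lengths."""
--     m = len(target)
--     if m == 0:
--         return -1
--
--     # failure table: fail[i] = length of the longest proper border of target[:i+1]
--     fail = [0] * m
--     k = 0
--     for i in range(1, m):
--         while k and target[i] != target[k]:
--             k = fail[k - 1]
--         if target[i] == target[k]:
--             k += 1
--         fail[i] = k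
--
--     # single left-to-right pass over source
--     k = 0
--     for i, tok in enumerate(source):
--         while k and tok != target[k]:
--             k = fail[k - 1]
--         if tok == target[k]:
--             k += 1
--         if k == m:
--             return i - m + 1
--
--     # fuzzy fallback on the stripped character strings
--     target_str = ''.join(target).replace('##', '')
--     source_str = ''.join(source).replace('##', '')
--     idx = source_str.find(target_str)
--     if idx == -1:
--         return -1
--     prefix = []
--     total = 0
--     for tok in source:
--         total += len(tok.replace('##', ''))
--         prefix.append(total)
--     # binary search for the first running total exceeding idx
--     lo, hi = 0, len(prefix)
--     while lo < hi:
--         mid = (lo + hi) // 2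
--         if prefix[mid] <= idx:
--             lo = mid + 1
--         else:
--             hi = mid
--     return lo if lo < len(source) else -1
-- ===== Notes on version B (the rewrite author's own statement) =====
-- stated objective: faster
-- what changed: The token-matching phase becomes Knuth-Morris-Pratt (failure table + one linear pass) instead of comparing a fresh slice at every start position, and the fallback maps the character offset back to a token index by binary search over the running stripped lengths instead of a cumulative counting loop.
import Mathlib
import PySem

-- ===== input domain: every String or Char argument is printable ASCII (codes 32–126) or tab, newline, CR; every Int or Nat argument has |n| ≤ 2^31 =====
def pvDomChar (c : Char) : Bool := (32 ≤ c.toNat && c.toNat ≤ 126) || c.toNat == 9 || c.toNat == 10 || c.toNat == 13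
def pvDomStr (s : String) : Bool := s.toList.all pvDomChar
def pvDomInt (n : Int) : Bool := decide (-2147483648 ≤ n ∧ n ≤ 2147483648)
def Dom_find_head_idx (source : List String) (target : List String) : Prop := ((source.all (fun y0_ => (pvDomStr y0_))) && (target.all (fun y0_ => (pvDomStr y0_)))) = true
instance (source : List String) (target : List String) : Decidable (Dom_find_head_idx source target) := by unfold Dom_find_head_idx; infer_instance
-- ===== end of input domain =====

-- B replaces A's quadratic slice-comparison scan by a KMP search (failure table + single pass)
-- and the fallback's counting loop by a binary search over the running stripped lengths; objective: faster (asymptotic in the token-matching phase).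


-- ===== PORT A =====
-- len(token.replace('##', ''))
def pvStripLen (t : String) : Int := PySem.Str.len (PySem.Str.replace t "##" "")

-- A's first loop: for i in range(len(source)): if source[i:i + target_len] == target: return i
def pvAFind (source target : List String) (tlen : Int) : List Int → Option Int
  | [] => none
  | i :: rest =>
    if PySem.List.slice source (some i) (some (i + tlen)) = target then some i
    else pvAFind source target tlen rest

-- A's fallback loop: for token_idx, token in enumerate(source): char_count += …; if char_count > idx: return token_idx
def pvAFall (idx : Int) : List String → Int → Int → Int
  | [], _, _ => -1
  | tok :: rest, cc, k =>
    let cc' := cc + pvStripLen tok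
    if cc' > idx then k else pvAFall idx rest cc' (k + 1)

def find_head_idx (source : List String) (target : List String) : Int :=
  let target_len : Int := target.length
  if target_len = 0 then -1
  else
    match pvAFind source target target_len (PySem.List.pyRange 0 source.length 1) with
    | some i => i
    | none =>
      let target_str := PySem.Str.replace (PySem.Str.join "" target) "##" ""
      let source_str := PySem.Str.replace (PySem.Str.join "" source) "##" ""
      let idx := PySem.Str.find source_str target_str
      if idx ≠ -1 then pvAFall idx source 0 0 else -1

-- ===== PORT B =====
-- B's inner `while k and x != target[k]: k = fail[k-1]`.  Python's target[k] is in range at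
-- every reachable state, ported as getD; the `min … (k-1)` is only a termination guard — the
-- failure table satisfies fail[t] ≤ t (a border of target[:t+1] is proper), so it never
-- changes the value.
def pvKmpWhile (fail : List Nat) (tgt : List String) (x : String) (k : Nat) : Nat :=
  if k = 0 then 0
  else if x = tgt.getD k "" then k
  else pvKmpWhile fail tgt x (min (fail.getD (k - 1) 0) (k - 1))
termination_by k
decreasing_by
  rename_i hk _
  have := Nat.min_le_right (fail.getD (k - 1) 0) (k - 1)
  omega

-- the shared loop body: while-loop, then `if x == target[k]: k += 1`
def pvKmpStep (fail : List Nat) (tgt : List String) (x : String) (k : Nat) : Nat :=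
  let k1 := pvKmpWhile fail tgt x k
  if x = tgt.getD k1 "" then k1 + 1 else k1

-- B's table build: fail = [0]*m; for i in range(1, m): …; fail[i] = k
def pvBuildFail (tgt : List String) (m : Nat) : List Nat :=
  ((List.range' 1 (m - 1)).foldl
    (fun (st : List Nat × Nat) i =>
      let k2 := pvKmpStep st.1 tgt (tgt.getD i "") st.2
      (st.1.set i k2, k2))
    (List.replicate m 0, 0)).1

-- B's scan: for i, tok in enumerate(source): …; if k == m: return i - m + 1
def pvKmpScan (fail : List Nat) (tgt : List String) (m : Nat) : List String → Nat → Nat → Option Int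
  | [], _, _ => none
  | tok :: rest, i, k =>
    let k2 := pvKmpStep fail tgt tok k
    if k2 = m then some ((i : Int) - (m : Int) + 1)
    else pvKmpScan fail tgt m rest (i + 1) k2

-- B's running totals:  total += len(tok.replace('##','')); prefix.append(total)
def pvPrefix (a : Int) : List String → List Int
  | [] => []
  | tok :: rest =>
    let a' := a + pvStripLen tok
    a' :: pvPrefix a' rest

-- B's hand-written binary search:  while lo < hi: mid = (lo+hi)//2; …
def pvBisect (pre : List Int) (idx : Int) (lo hi : Nat) : Nat :=
  if lo < hi then
    let mid := (lo + hi) / 2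
    if pre.getD mid 0 ≤ idx then pvBisect pre idx (mid + 1) hi
    else pvBisect pre idx lo mid
  else lo
termination_by hi - lo
decreasing_by all_goals omega

def find_head_idx_alt (source : List String) (target : List String) : Int :=
  let m := target.length
  if m = 0 then -1
  else
    let fail := pvBuildFail target m
    match pvKmpScan fail target m source 0 0 with
    | some r => r
    | none =>
      let target_str := PySem.Str.replace (PySem.Str.join "" target) "##" ""
      let source_str := PySem.Str.replace (PySem.Str.join "" source) "##" ""
      let idx := PySem.Str.find source_str target_str
      if idx = -1 then -1
      else
        let pre := pvPrefix 0 source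
        let pos := pvBisect pre idx 0 pre.length
        if (pos : Int) < (source.length : Int) then (pos : Int) else -1

-- ===== PRECONDITION & SPEC =====
def Spec_find_head_idx (source : List String) (target : List String) (out : Int) : Prop := out = find_head_idx_alt source target
instance (source : List String) (target : List String) (out : Int) : Decidable (Spec_find_head_idx source target out) := by unfold Spec_find_head_idx; infer_instance

-- ===== CLAIM (what is proved, stated in full; the proofs are below) =====
def Claim_equal_find_head_idx : Prop := ∀ (source : List String) (target : List String), Dom_find_head_idx source target → Spec_find_head_idx source target (find_head_idx source target)

-- ===== LEMMAS AND PROOFS =====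

-- ---- proof-land notions: borders, the greatest-suffix invariant, first match end ----

-- longest proper border of tgt.take l
def pvBord (tgt : List String) (l : Nat) : Nat :=
  Nat.findGreatest (fun j => tgt.take j <:+ tgt.take l) (l - 1)

-- k is the greatest j ≤ b with tgt.take j a suffix of s
def pvGB (tgt s : List String) (b k : Nat) : Prop :=
  k ≤ b ∧ tgt.take k <:+ s ∧ ∀ j, k < j → j ≤ b → ¬ tgt.take j <:+ s

-- relative index of the first element of `rest` at which an occurrence of tgt (as a suffix) ends
def pvFE (tgt : List String) : List String → List String → Option Nat
  | _, [] => none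
  | s, tok :: rest =>
    if tgt <:+ (s ++ [tok]) then some 0
    else (pvFE tgt (s ++ [tok]) rest).map (· + 1)

theorem pv_suffix_snoc_iff (l s : List String) (x y : String) :
    (l ++ [x]) <:+ (s ++ [y]) ↔ l <:+ s ∧ x = y := by
  rw [← List.reverse_prefix]
  simp only [List.reverse_append, List.reverse_singleton, List.singleton_append]
  rw [List.cons_prefix_cons, ← List.reverse_prefix]
  simp [and_comm]

theorem pv_take_suffix_snoc (tgt s : List String) (x : String) (j : Nat) (hj : j < tgt.length) :
    tgt.take (j + 1) <:+ s ++ [x] ↔ tgt.take j <:+ s ∧ tgt[j] = x := by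
  rw [List.take_succ_eq_append_getElem hj, pv_suffix_snoc_iff]

theorem pvBord_le (tgt : List String) (l : Nat) : pvBord tgt l ≤ l - 1 := by
  unfold pvBord
  exact Nat.findGreatest_le _

theorem pvBord_suffix (tgt : List String) (l : Nat) :
    tgt.take (pvBord tgt l) <:+ tgt.take l := by
  unfold pvBord
  exact Nat.findGreatest_spec (P := fun j => tgt.take j <:+ tgt.take l) (Nat.zero_le _) (by simp)

theorem le_pvBord (tgt : List String) (l j : Nat) (hj : j ≤ l - 1)
    (h : tgt.take j <:+ tgt.take l) : j ≤ pvBord tgt l := by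
  unfold pvBord
  exact Nat.le_findGreatest hj h

theorem pvGB_eq_bord (tgt : List String) (l k : Nat) (_hl : l ≤ tgt.length)
    (hGB : pvGB tgt (tgt.take l) (l - 1) k) : k = pvBord tgt l := by
  obtain ⟨hkb, hks, hmax⟩ := hGB
  have h1 : k ≤ pvBord tgt l := le_pvBord tgt l k hkb hks
  have h2 : pvBord tgt l ≤ k := by
    by_contra h
    exact hmax (pvBord tgt l) (by omega) (pvBord_le tgt l) (pvBord_suffix tgt l)
  omega

theorem pvKmpWhile_spec (tgt : List String) (fail : List Nat) (x : String) (s : List String) :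
    ∀ k, k < tgt.length → tgt.take k <:+ s →
    (∀ t, t < k → fail.getD t 0 = pvBord tgt (t + 1)) →
    (pvKmpWhile fail tgt x k ≤ k ∧
     tgt.take (pvKmpWhile fail tgt x k) <:+ s ∧
     (pvKmpWhile fail tgt x k = 0 ∨ x = tgt.getD (pvKmpWhile fail tgt x k) "") ∧
     (∀ j, j ≤ k → tgt.take j <:+ s → x = tgt.getD j "" → j ≤ pvKmpWhile fail tgt x k)) := by
  intro k
  induction k using Nat.strong_induction_on with
  | _ k ih =>
    intro hkm hks hfail
    rw [pvKmpWhile]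
    split_ifs with hk0 hx
    · subst hk0
      exact ⟨le_refl 0, by simp, Or.inl rfl, fun j hj _ _ => hj⟩
    · exact ⟨le_refl k, hks, Or.inr hx, fun j hj _ _ => hj⟩
    · have hf := hfail (k - 1) (by omega)
      have hk1 : k - 1 + 1 = k := by omega
      rw [hk1] at hf
      have hble : pvBord tgt k ≤ k - 1 := pvBord_le tgt k
      have hmin : min (fail.getD (k - 1) 0) (k - 1) = pvBord tgt k := by rw [hf]; omega
      rw [hmin]
      have hb_lt : pvBord tgt k < k := by omega
      have hbm : pvBord tgt k < tgt.length := by omega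
      have hbs : tgt.take (pvBord tgt k) <:+ s := (pvBord_suffix tgt k).trans hks
      obtain ⟨ih1, ih2, ih3, ih4⟩ := ih (pvBord tgt k) hb_lt hbm hbs (fun t ht => hfail t (by omega))
      refine ⟨by omega, ih2, ih3, ?_⟩
      intro j hj hjs hjx
      have hjk : j ≠ k := by
        intro h; subst h; exact hx hjx
      have hjlen : j ≤ tgt.length := by omega
      have hsuf : tgt.take j <:+ tgt.take k :=
        List.suffix_of_suffix_length_le hjs hks
          (by rw [List.length_take, List.length_take]; omega)
      exact ih4 j (le_pvBord tgt k j (by omega) hsuf) hjs hjx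

theorem pvKmpStep_spec (tgt : List String) (fail : List Nat) (x : String) (s : List String)
    (b b' k : Nat) (hm : k < tgt.length) (hb' : b' ≤ b + 1) (hb'm : b' ≤ tgt.length)
    (hkb : k < b') (hGB : pvGB tgt s b k)
    (hfail : ∀ t, t < k → fail.getD t 0 = pvBord tgt (t + 1)) :
    pvGB tgt (s ++ [x]) b' (pvKmpStep fail tgt x k) := by
  obtain ⟨hkb2, hks, hmax⟩ := hGB
  obtain ⟨hw1, hw2, hw3, hw4⟩ := pvKmpWhile_spec tgt fail x s k hm hks hfail
  set k1 := pvKmpWhile fail tgt x k with hk1def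
  unfold pvKmpStep
  rw [← hk1def]
  have hk1m : k1 < tgt.length := by omega
  -- shared maximality argument: any positive border of s ++ [x] shortened by one is ≤ k1
  have key : ∀ j, j ≤ b' → 0 < j → tgt.take j <:+ s ++ [x] → j - 1 ≤ k1 ∧ x = tgt.getD (j - 1) "" := by
    intro j hjb hj0 hjs
    obtain ⟨j', rfl⟩ : ∃ j', j = j' + 1 := ⟨j - 1, by omega⟩
    have hj'm : j' < tgt.length := by omega
    rw [pv_take_suffix_snoc tgt s x j' hj'm] at hjs
    obtain ⟨hjs', hjx⟩ := hjs
    have hgd : x = tgt.getD j' "" := by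
      rw [List.getD_eq_getElem?_getD, List.getElem?_eq_getElem hj'm]
      exact hjx.symm
    have hj'k : j' ≤ k := by
      by_contra hcon
      exact hmax j' (by omega) (by omega) hjs'
    exact ⟨by simpa using hw4 j' hj'k hjs' hgd, by simpa using hgd⟩
  show pvGB tgt (s ++ [x]) b' (if x = tgt.getD k1 "" then k1 + 1 else k1)
  split_ifs with hx
  · -- x == target[k1]: k becomes k1 + 1
    refine ⟨by omega, ?_, ?_⟩
    · rw [pv_take_suffix_snoc tgt s x k1 hk1m]
      refine ⟨hw2, ?_⟩
      rw [hx, List.getD_eq_getElem?_getD, List.getElem?_eq_getElem hk1m]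
      rfl
    · intro j hj hjb hjs
      obtain ⟨h1, _⟩ := key j hjb (by omega) hjs
      omega
  · -- x != target[k1]: the while loop must have exited at 0
    have hk10 : k1 = 0 := by
      rcases hw3 with h | h
      · exact h
      · exact absurd h hx
    rw [hk10]
    rw [hk10] at hx
    refine ⟨Nat.zero_le _, by simp, ?_⟩
    intro j hj hjb hjs
    obtain ⟨h1, h2⟩ := key j hjb (by omega) hjs
    have : j - 1 = 0 := by omega
    rw [this] at h2
    exact hx h2

theorem pvBuildFail_inv (tgt : List String) (hm : 0 < tgt.length) :
    ∀ n, n ≤ tgt.length - 1 →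
    (((List.range' 1 n).foldl
        (fun (st : List Nat × Nat) i =>
          let k2 := pvKmpStep st.1 tgt (tgt.getD i "") st.2
          (st.1.set i k2, k2))
        (List.replicate tgt.length 0, 0)).1.length = tgt.length ∧
     (∀ t, t ≤ n → (((List.range' 1 n).foldl
        (fun (st : List Nat × Nat) i =>
          let k2 := pvKmpStep st.1 tgt (tgt.getD i "") st.2
          (st.1.set i k2, k2))
        (List.replicate tgt.length 0, 0)).1.getD t 0 = pvBord tgt (t + 1))) ∧
     pvGB tgt (tgt.take (n + 1)) n (((List.range' 1 n).foldl
        (fun (st : List Nat × Nat) i =>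
          let k2 := pvKmpStep st.1 tgt (tgt.getD i "") st.2
          (st.1.set i k2, k2))
        (List.replicate tgt.length 0, 0)).2)) := by
  intro n
  induction n with
  | zero =>
    intro _
    refine ⟨by simp, ?_, ?_⟩
    · intro t ht
      interval_cases t
      have h0 : (List.replicate tgt.length (0:Nat)).getD 0 0 = 0 := by
        simp [List.getD_eq_getElem?_getD, hm]
      simp only [List.range'_zero, List.foldl_nil, h0]
      unfold pvBord
      simp
    · exact ⟨le_refl 0, by simp, fun j h1 h2 => by omega⟩
  | succ n ih =>
    intro hn
    obtain ⟨ih1, ih2, ih3⟩ := ih (by omega)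
    rw [List.range'_1_concat, List.foldl_append, List.foldl_cons, List.foldl_nil]
    have h1n : 1 + n = n + 1 := by omega
    rw [h1n]
    set st := ((List.range' 1 n).foldl
        (fun (st : List Nat × Nat) i =>
          let k2 := pvKmpStep st.1 tgt (tgt.getD i "") st.2
          (st.1.set i k2, k2))
        (List.replicate tgt.length 0, 0)) with hst
    have hkn : st.2 ≤ n := ih3.1
    have hn1m : n + 1 < tgt.length := by omega
    have hx : tgt.getD (n + 1) "" = tgt[n + 1] := by
      rw [List.getD_eq_getElem?_getD, List.getElem?_eq_getElem hn1m]; rfl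
    have hsnoc : tgt.take (n + 1) ++ [tgt.getD (n + 1) ""] = tgt.take (n + 2) := by
      rw [hx, List.take_succ_eq_append_getElem hn1m]
    have hstep : pvGB tgt (tgt.take (n + 2)) (n + 1)
        (pvKmpStep st.1 tgt (tgt.getD (n + 1) "") st.2) := by
      rw [← hsnoc]
      exact pvKmpStep_spec tgt st.1 (tgt.getD (n + 1) "") (tgt.take (n + 1)) n (n + 1) st.2
        (by omega) (by omega) (by omega) (by omega) ih3
        (fun t ht => ih2 t (by omega))
    set k2 := pvKmpStep st.1 tgt (tgt.getD (n + 1) "") st.2 with hk2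
    have hk2b : k2 = pvBord tgt (n + 2) := by
      exact pvGB_eq_bord tgt (n + 2) k2 (by omega) (by simpa using hstep)
    refine ⟨by simp [List.length_set, ih1], ?_, ?_⟩
    · intro t ht
      by_cases hteq : t = n + 1
      · subst hteq
        show ((st.1.set (n + 1) k2).getD (n + 1) 0) = pvBord tgt (n + 2)
        rw [List.getD_eq_getElem?_getD, List.getElem?_set_self (by omega)]
        exact hk2b
      · show ((st.1.set (n + 1) k2).getD t 0) = pvBord tgt (t + 1)
        rw [List.getD_eq_getElem?_getD, List.getElem?_set_ne (by omega),
          ← List.getD_eq_getElem?_getD]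
        exact ih2 t (by omega)
    · exact hstep

theorem pvBuildFail_spec (tgt : List String) (hm : 0 < tgt.length) :
    ∀ t, t < tgt.length → (pvBuildFail tgt tgt.length).getD t 0 = pvBord tgt (t + 1) := by
  intro t ht
  have := (pvBuildFail_inv tgt hm (tgt.length - 1) (le_refl _)).2.1 t (by omega)
  unfold pvBuildFail
  exact this

theorem pvKmpScan_spec (tgt : List String) (fail : List Nat) (_hm : 0 < tgt.length)
    (hfail : ∀ t, t < tgt.length → fail.getD t 0 = pvBord tgt (t + 1)) :
    ∀ (rest s : List String) (k : Nat), pvGB tgt s tgt.length k → k < tgt.length →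
    pvKmpScan fail tgt tgt.length rest s.length k
      = (pvFE tgt s rest).map (fun t => ((s.length + t : Nat) : Int) - tgt.length + 1) := by
  intro rest
  induction rest with
  | nil => intro s k _ _; simp [pvKmpScan, pvFE]
  | cons tok rest' ih =>
    intro s k hGB hk
    have hstep := pvKmpStep_spec tgt fail tok s tgt.length tgt.length k hk (by omega)
      (le_refl _) hk hGB (fun t ht => hfail t (by omega))
    obtain ⟨hs1, hs2, hs3⟩ := hstep
    by_cases hk2 : pvKmpStep fail tgt tok k = tgt.length
    · have hsuf : tgt <:+ s ++ [tok] := by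
        rw [← List.take_length (l := tgt), ← hk2]
        exact hs2
      simp only [pvKmpScan, pvFE, if_pos hk2, if_pos hsuf, Option.map_some]
      norm_num
    · have hk2m : pvKmpStep fail tgt tok k < tgt.length := by omega
      have hne : ¬ tgt <:+ s ++ [tok] := by
        intro hcon
        refine hs3 tgt.length hk2m (le_refl _) ?_
        rwa [List.take_length]
      simp only [pvKmpScan, pvFE, if_neg hk2, if_neg hne]
      have hrec := ih (s ++ [tok]) (pvKmpStep fail tgt tok k) ⟨hs1, hs2, hs3⟩ hk2m
      rw [List.length_append, List.length_cons, List.length_nil] at hrec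
      rw [hrec, Option.map_map]
      rcases pvFE tgt (s ++ [tok]) rest' with _ | t
      · rfl
      · simp only [Option.map_some, Function.comp_apply]
        congr 1
        push_cast
        ring

-- ---- A's scan equals the same first-match-end ----

theorem pvAFind_eq_find? (source target : List String) (tlen : Int) (l : List Int) :
    pvAFind source target tlen l
      = l.find? (fun i => decide (PySem.List.slice source (some i) (some (i + tlen)) = target)) := by
  induction l with
  | nil => rfl
  | cons h t ih =>
    simp only [pvAFind, List.find?]
    split_ifs with hc <;> simp [hc, ih]

theorem pv_find?_range_eq_some {p : Nat → Bool} (n r : Nat) (hr : r < n) (hp : p r = true)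
    (hmin : ∀ j, j < r → ¬ p j = true) : (List.range n).find? p = some r := by
  rw [List.find?_eq_some_iff_getElem]
  refine ⟨hp, r, by simpa using hr, by simp, ?_⟩
  intro j hj
  simpa [List.getElem_range] using hmin j hj

theorem pv_find?_range_some_elim {p : Nat → Bool} (n r : Nat)
    (h : (List.range n).find? p = some r) : r < n ∧ p r = true ∧ ∀ j, j < r → ¬ p j = true := by
  rw [List.find?_eq_some_iff_getElem] at h
  obtain ⟨hp, i, hi, hieq, hmin⟩ := h
  simp only [List.getElem_range] at hieq hmin
  subst hieq
  simp only [List.length_range] at hi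
  exact ⟨hi, hp, fun j hj => by simpa using hmin j hj⟩

theorem pv_find?_range_succ (p : Nat → Bool) (n : Nat) :
    (List.range (n + 1)).find? p
      = if p 0 then some 0 else ((List.range n).find? (fun t => p (t + 1))).map (· + 1) := by
  rw [List.range_succ_eq_map, List.find?_cons]
  cases hp : p 0
  · simp [List.find?_map]
    rfl
  · simp

-- a slice match starting at k is exactly an occurrence of tgt ending at k + m
theorem pv_start_iff (source tgt : List String) (hm : 0 < tgt.length) (k : Nat) :
    PySem.List.slice source (some (k : Int)) (some ((k : Int) + (tgt.length : Int))) = tgt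
      ↔ (k + tgt.length ≤ source.length ∧ tgt <:+ source.take (k + tgt.length)) := by
  rw [PySem.List.slice_natCast_add]
  constructor
  · intro h
    have hlen : ((source.drop k).take tgt.length).length = tgt.length := by rw [h]
    rw [List.length_take, List.length_drop] at hlen
    have hkm : k + tgt.length ≤ source.length := by omega
    refine ⟨hkm, ?_⟩
    have hdt : (source.take (k + tgt.length)).drop k = (source.drop k).take tgt.length := by
      rw [List.drop_take]
      congr 1
      omega
    have hs := List.drop_suffix k (source.take (k + tgt.length))
    rw [hdt, h] at hs
    exact hs
  · rintro ⟨hkm, hsuf⟩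
    have hlen : (source.take (k + tgt.length)).length = k + tgt.length :=
      List.length_take_of_le hkm
    have h2 := List.suffix_iff_eq_drop.mp hsuf
    rw [hlen] at h2
    have hk : k + tgt.length - tgt.length = k := by omega
    rw [hk, List.drop_take] at h2
    have hk2 : k + tgt.length - k = tgt.length := by omega
    rw [hk2] at h2
    exact h2.symm

theorem pvFE_eq (tgt : List String) :
    ∀ (rest s : List String), pvFE tgt s rest
      = (List.range rest.length).find? (fun t => decide (tgt <:+ s ++ rest.take (t + 1))) := by
  intro rest
  induction rest with
  | nil => intro s; simp [pvFE]
  | cons tok rest' ih =>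
    intro s
    rw [show (tok :: rest').length = rest'.length + 1 from rfl, pv_find?_range_succ]
    by_cases hc : tgt <:+ s ++ [tok]
    · simp [pvFE, hc]
    · have h0 : (decide (tgt <:+ s ++ (tok :: rest').take (0 + 1))) = false := by
        simpa using hc
      simp only [pvFE, if_neg hc, h0, Bool.false_eq_true, if_false]
      rw [ih (s ++ [tok])]
      have hfun : (fun t => decide (tgt <:+ s ++ (tok :: rest').take (t + 1 + 1)))
          = (fun t => decide (tgt <:+ (s ++ [tok]) ++ rest'.take (t + 1))) := by
        funext t
        rw [List.take_succ_cons, List.append_cons]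
      rw [hfun]

theorem pvAFind_spec (source tgt : List String) (hm : 0 < tgt.length) :
    pvAFind source tgt tgt.length (PySem.List.pyRange 0 source.length 1)
      = (pvFE tgt [] source).map (fun t => ((t : Int) + 1 - tgt.length)) := by
  rw [pvAFind_eq_find?, PySem.List.pyRange_zero_nat, List.find?_map, pvFE_eq]
  simp only [List.nil_append]
  -- abbreviations
  set n := source.length with hn
  set m := tgt.length with hmm
  set P : Nat → Bool := fun k =>
    decide (PySem.List.slice source (some (k : Int)) (some ((k : Int) + (m : Int))) = tgt) with hP
  set Q : Nat → Bool := fun t => decide (tgt <:+ source.take (t + 1)) with hQ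
  have hPiff : ∀ k, P k = true ↔ (k + m ≤ n ∧ tgt <:+ source.take (k + m)) := by
    intro k
    rw [hP]
    simp only [decide_eq_true_eq]
    exact pv_start_iff source tgt hm k
  have hQiff : ∀ t, Q t = true ↔ tgt <:+ source.take (t + 1) := by
    intro t; rw [hQ]; simp
  have hQm : ∀ t, Q t = true → m ≤ t + 1 := by
    intro t ht
    have := (hQiff t).mp ht
    have hlen := this.length_le
    rw [List.length_take] at hlen
    omega
  show ((List.range n).find? (P ∘ Nat.cast)).map (fun k : Nat => (k : Int))
      = ((List.range n).find? Q).map (fun t => ((t : Int) + 1 - m))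
  cases hq : (List.range n).find? Q with
  | none =>
    rw [List.find?_eq_none] at hq
    have : (List.range n).find? (P ∘ Nat.cast) = none := by
      rw [List.find?_eq_none]
      intro k hk
      rw [List.mem_range] at hk
      simp only [Function.comp_apply]
      intro hPk
      obtain ⟨hkm, hsuf⟩ := (hPiff k).mp hPk
      have hend : Q (k + m - 1) = true := by
        rw [hQiff]
        have : k + m - 1 + 1 = k + m := by omega
        rw [this]
        exact hsuf
      exact hq (k + m - 1) (List.mem_range.mpr (by omega)) hend
    rw [this]
    rfl
  | some t =>
    obtain ⟨htn, hQt, hQmin⟩ := pv_find?_range_some_elim n t hq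
    have hmt := hQm t hQt
    set k0 := t + 1 - m with hk0
    have hPk0 : P k0 = true := by
      rw [hPiff]
      have he : k0 + m = t + 1 := by omega
      rw [he]
      exact ⟨by omega, (hQiff t).mp hQt⟩
    have hfind : (List.range n).find? (P ∘ Nat.cast) = some k0 := by
      apply pv_find?_range_eq_some n k0 (by omega)
      · simpa using hPk0
      · intro j hj hPj
        simp only [Function.comp_apply] at hPj
        obtain ⟨hjm, hjsuf⟩ := (hPiff j).mp hPj
        have hQj : Q (j + m - 1) = true := by
          rw [hQiff]
          have : j + m - 1 + 1 = j + m := by omega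
          rw [this]
          exact hjsuf
        exact hQmin (j + m - 1) (by omega) hQj
    rw [hfind]
    simp only [Option.map_some]
    congr 1
    show (k0 : Int) = (t : Int) + 1 - (m : Int)
    rw [hk0]
    omega

-- ---- fallback ----

theorem pvStripLen_nonneg (t : String) : 0 ≤ pvStripLen t := by
  simp [pvStripLen, PySem.Str.len_eq]

theorem pvPrefix_ge (a x : Int) (l : List String) (hx : x ∈ pvPrefix a l) : a ≤ x := by
  induction l generalizing a with
  | nil => simp [pvPrefix] at hx
  | cons tok rest ih =>
    simp only [pvPrefix, List.mem_cons] at hx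
    have h0 := pvStripLen_nonneg tok
    rcases hx with h | h
    · omega
    · have := ih (a + pvStripLen tok) h
      omega

theorem pvPrefix_length (a : Int) (l : List String) : (pvPrefix a l).length = l.length := by
  induction l generalizing a with
  | nil => rfl
  | cons tok rest ih => simp [pvPrefix, ih]

theorem pvPrefix_pairwise (a : Int) (l : List String) : (pvPrefix a l).Pairwise (· ≤ ·) := by
  induction l generalizing a with
  | nil => exact List.Pairwise.nil
  | cons tok rest ih =>
    refine List.Pairwise.cons (fun x hx => pvPrefix_ge _ x _ hx) (ih _)

theorem pvAFall_eq_count (idx : Int) (l : List String) :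
    ∀ (a k : Int), pvAFall idx l a k =
      (if (pvPrefix a l).countP (fun c => decide (c ≤ idx)) = l.length then -1
       else k + ((pvPrefix a l).countP (fun c => decide (c ≤ idx)) : Int)) := by
  induction l with
  | nil => intro a k; simp [pvAFall, pvPrefix]
  | cons tok rest ih =>
    intro a k
    simp only [pvAFall, pvPrefix]
    by_cases hgt : a + pvStripLen tok > idx
    · have hzero : (pvPrefix (a + pvStripLen tok) rest).countP (fun c => decide (c ≤ idx)) = 0 := by
        rw [List.countP_eq_zero]
        intro x hx
        have := pvPrefix_ge (a + pvStripLen tok) x rest hx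
        simp; omega
      simp only [if_pos hgt, List.countP_cons, hzero]
      have hfalse : (decide (a + pvStripLen tok ≤ idx)) = false := by simp; omega
      simp [hfalse]
    · have hle : a + pvStripLen tok ≤ idx := by omega
      simp only [if_neg hgt, List.countP_cons, List.length_cons]
      rw [ih (a + pvStripLen tok) (k + 1)]
      have htrue : (decide (a + pvStripLen tok ≤ idx)) = true := by simpa using hle
      simp only [htrue, if_true]
      split_ifs with h1 h2 h2 <;> push_cast <;> omega

theorem pv_count_threshold (l : List Int) (idx : Int) (hs : l.Pairwise (· ≤ ·)) :
    ∀ j, j < l.length → ((l.getD j 0 ≤ idx) ↔ j < l.countP (fun c => decide (c ≤ idx))) := by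
  induction l with
  | nil => intro j hj; simp at hj
  | cons h t ihl =>
    rw [List.pairwise_cons] at hs
    intro j hj
    by_cases hh : h ≤ idx
    · have hcnt : (h :: t).countP (fun c => decide (c ≤ idx))
          = t.countP (fun c => decide (c ≤ idx)) + 1 := by
        rw [List.countP_cons]
        simp [hh]
      rw [hcnt]
      cases j with
      | zero => simpa using hh
      | succ j' =>
        have := ihl hs.2 j' (by simpa using hj)
        simpa [List.getD_cons_succ] using this
    · have hzero : t.countP (fun c => decide (c ≤ idx)) = 0 := by
        rw [List.countP_eq_zero]
        intro x hx
        have := hs.1 x hx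
        simp
        omega
      have hcnt : (h :: t).countP (fun c => decide (c ≤ idx)) = 0 := by
        rw [List.countP_cons]
        simp [hh, hzero]
      rw [hcnt]
      cases j with
      | zero => simpa using hh
      | succ j' =>
        simp only [List.getD_cons_succ]
        have hj' : j' < t.length := by simpa using hj
        have hmem : t.getD j' 0 ∈ t := by
          rw [List.getD_eq_getElem?_getD, List.getElem?_eq_getElem hj']
          exact List.getElem_mem hj'
        have := hs.1 _ hmem
        constructor
        · intro hle; omega
        · intro hlt; omega

theorem pvBisect_eq (pre : List Int) (idx : Int) (r : Nat)
    (hthr : ∀ j, j < pre.length → ((pre.getD j 0 ≤ idx) ↔ j < r)) :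
    ∀ lo hi, lo ≤ r → r ≤ hi → hi ≤ pre.length → pvBisect pre idx lo hi = r := by
  suffices H : ∀ d lo hi, hi - lo ≤ d → lo ≤ r → r ≤ hi → hi ≤ pre.length →
      pvBisect pre idx lo hi = r by
    exact fun lo hi h1 h2 h3 => H (hi - lo) lo hi (le_refl _) h1 h2 h3
  intro d
  induction d with
  | zero =>
    intro lo hi hle h1 h2 h3
    rw [pvBisect, if_neg (by omega)]
    omega
  | succ d ihd =>
    intro lo hi hle h1 h2 h3
    rw [pvBisect]
    by_cases hlh : lo < hi
    · rw [if_pos hlh]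
      have hmid1 : lo ≤ (lo + hi) / 2 := by omega
      have hmid2 : (lo + hi) / 2 < hi := by omega
      have hmidlen : (lo + hi) / 2 < pre.length := by omega
      by_cases hc : pre.getD ((lo + hi) / 2) 0 ≤ idx
      · rw [if_pos hc]
        have : (lo + hi) / 2 < r := (hthr _ hmidlen).mp hc
        exact ihd _ hi (by omega) (by omega) h2 h3
      · rw [if_neg hc]
        have : r ≤ (lo + hi) / 2 := by
          by_contra hcon
          exact hc ((hthr _ hmidlen).mpr (by omega))
        exact ihd lo _ (by omega) h1 (by omega) (by omega)
    · rw [if_neg hlh]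
      omega

-- ===== VERDICT (by name: the statement is the Claim_ definition above) =====
theorem find_head_idx_spec : Claim_equal_find_head_idx := by
  intro source target _
  show find_head_idx source target = find_head_idx_alt source target
  unfold find_head_idx find_head_idx_alt
  simp only []
  by_cases ht : target.length = 0
  · simp [ht]
  · have hm : 0 < target.length := Nat.pos_of_ne_zero ht
    have ht' : ¬ ((target.length : Int) = 0) := by exact_mod_cast ht
    rw [if_neg ht', if_neg ht]
    have hfail := pvBuildFail_spec target hm
    have hGB0 : pvGB target [] target.length 0 := by
      refine ⟨Nat.zero_le _, by simp, ?_⟩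
      intro j h1 h2 hsuf
      have := hsuf.length_le
      rw [List.length_take] at this
      simp only [List.length_nil, Nat.le_zero] at this
      omega
    have hscan := pvKmpScan_spec target (pvBuildFail target target.length) hm hfail
      source [] 0 hGB0 hm
    simp only [List.length_nil] at hscan
    have hA := pvAFind_spec source target hm
    cases hfe : pvFE target [] source with
    | some t =>
      rw [hfe] at hA hscan
      simp at hA hscan
      rw [hA]
      simp only [hscan]
      omega
    | none =>
      rw [hfe] at hA hscan
      simp at hA hscan
      rw [hA]
      simp only [hscan]
      set idx := PySem.Str.find (PySem.Str.replace (PySem.Str.join "" source) "##" "")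
        (PySem.Str.replace (PySem.Str.join "" target) "##" "") with hidx
      by_cases hneg : idx = -1
      · simp [hneg]
      · rw [if_pos hneg, if_neg hneg, pvAFall_eq_count]
        set c := (pvPrefix 0 source).countP (fun x => decide (x ≤ idx)) with hc
        have hcle : c ≤ source.length := by
          calc c ≤ (pvPrefix 0 source).length := List.countP_le_length
            _ = source.length := pvPrefix_length 0 source
        have hbis : pvBisect (pvPrefix 0 source) idx 0 (pvPrefix 0 source).length = c := by
          apply pvBisect_eq (pvPrefix 0 source) idx c
            (pv_count_threshold (pvPrefix 0 source) idx (pvPrefix_pairwise 0 source))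
            0 (pvPrefix 0 source).length (Nat.zero_le _)
          · rw [pvPrefix_length]; exact hcle
          · exact le_refl _
        rw [hbis]
        by_cases hceq : c = source.length
        · simp [hceq]
        · have h2 : c < source.length := by omega
          have h2' : (c : Int) < (source.length : Int) := by omega
          simp [hceq, h2']
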